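-- pv_equiv track=rewrite | github.com/MechMine/my_tasks_python | solutions/sem01/lesson03/task3.py | get_nth_digit
-- ===== SOURCE A (Python) =====
-- def get_nth_digit(num: int) -> int:
--     if num <= 5:
--         return (num - 1) * 2
--     k = 2
--     m = 95
--     ost = num - 5
--     while num > m:
--         ost = num - m
--
--         k += 1
--         m += 45 * k * 10 ** (k - 2)
--
--     n = 10 ** (k - 1) - 2 + 2 * ((ost + k - 1) // k)
--     if ost % k == 0:
--         return n % 10
--     else:
--         return (n // 10 ** (k - ost % k)) % 10
-- ===== SOURCE B (Python) =====
-- def get_nth_digit(num: int) -> int: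
--     if num <= 5:
--         return (num - 1) * 2
--
--     def num_digits(x: int) -> int:
--         d = 1
--         while 10 ** d <= x:
--             d += 1
--         return d
--
--     def total_digits(i: int) -> int:
--         # number of digits in the concatenation str(0)+str(2)+...+str(2*i-2), i >= 1
--         d = num_digits(2 * i - 2)
--         return d * i - 5 * (10 ** (d - 1) - 1) // 9
--
--     # binary search for the smallest count hi of leading even numbers
--     # whose concatenation already contains digit position num
--     hi = 1
--     while total_digits(hi) < num:
--         hi *= 2
--     lo = 0
--     while hi - lo > 1:
--         mid = (lo + hi) // 2
--         if total_digits(mid) < num: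
--             lo = mid
--         else:
--             hi = mid
--     e = 2 * lo                      # the even number owning the digit
--     d = num_digits(e)
--     offset = num - 1 - total_digits(lo)   # 0-based position of the digit inside e
--     return (e // 10 ** (d - 1 - offset)) % 10
-- ===== Notes on version B (the rewrite author's own statement) =====
-- stated objective: alternative
-- what changed: B replaces A's block-skipping loop (accumulating per-digit-length thresholds m and leftover ost) by a binary search: a closed-form digit-count function total_digits(i) for the first i even numbers, located by exponential growth plus bisection, then direct digit extraction from the owning even number.
import Mathlib
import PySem

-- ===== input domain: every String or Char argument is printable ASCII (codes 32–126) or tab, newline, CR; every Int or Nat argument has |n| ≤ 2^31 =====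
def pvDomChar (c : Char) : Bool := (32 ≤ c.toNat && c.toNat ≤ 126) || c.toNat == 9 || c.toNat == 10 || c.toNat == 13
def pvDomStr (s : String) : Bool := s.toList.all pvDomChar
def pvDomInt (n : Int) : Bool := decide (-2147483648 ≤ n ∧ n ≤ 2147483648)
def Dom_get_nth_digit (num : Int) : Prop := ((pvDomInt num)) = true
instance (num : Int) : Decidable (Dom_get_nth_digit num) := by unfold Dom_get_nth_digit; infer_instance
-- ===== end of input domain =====

-- B is a different algorithm of similar cost ("alternative"): instead of A's block-skipping
-- loop over digit-length thresholds, it binary-searches the owning even number using a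
-- closed-form digit-count function.

-- ===== PORT A =====
-- while num > m: ost = num - m; k += 1; m += 45*k*10**(k-2)
-- fuel only makes the loop structurally total; 10**(k-2) ported as 10^(k-2).toNat,
-- exact since k ≥ 2 on every reachable state. Returns (k, ost).
def get_nth_digit_loopA (num : Int) (fuel : Nat) (k m ost : Int) : Int × Int :=
  match fuel with
  | 0 => (k, ost)
  | fuel + 1 =>
    if num > m then
      get_nth_digit_loopA num fuel (k + 1) (m + 45 * (k + 1) * 10 ^ (k + 1 - 2).toNat) (num - m)
    else (k, ost)

def get_nth_digit (num : Int) : Int :=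
  if num ≤ 5 then (num - 1) * 2
  else
    let p := get_nth_digit_loopA num num.toNat 2 95 (num - 5)
    let k := p.1
    let ost := p.2
    let n := 10 ^ (k - 1).toNat - 2 + 2 * PySem.Int.floordiv (ost + k - 1) k
    if PySem.Int.mod ost k = 0 then PySem.Int.mod n 10
    else PySem.Int.mod (PySem.Int.floordiv n (10 ^ (k - PySem.Int.mod ost k).toNat)) 10

-- ===== PORT B =====
-- d = 1; while 10**d <= x: d += 1   (fuel makes the loop structurally total; 10**d ported
-- as 10^d.toNat, exact since d ≥ 1 on every reachable state)
def get_nth_digit_ndLoop (x : Int) (fuel : Nat) (d : Int) : Int :=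
  match fuel with
  | 0 => d
  | fuel + 1 => if 10 ^ d.toNat ≤ x then get_nth_digit_ndLoop x fuel (d + 1) else d

def get_nth_digit_numDigits (x : Int) : Int :=
  get_nth_digit_ndLoop x (x.toNat + 1) 1

-- d = num_digits(2*i-2); return d*i - 5*(10**(d-1)-1)//9
def get_nth_digit_totalDigits (i : Int) : Int :=
  let d := get_nth_digit_numDigits (2 * i - 2)
  d * i - PySem.Int.floordiv (5 * (10 ^ (d - 1).toNat - 1)) 9

-- hi = 1; while total_digits(hi) < num: hi *= 2
def get_nth_digit_grow (num : Int) (fuel : Nat) (hi : Int) : Int :=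
  match fuel with
  | 0 => hi
  | fuel + 1 =>
    if get_nth_digit_totalDigits hi < num then get_nth_digit_grow num fuel (hi * 2) else hi

-- while hi - lo > 1: mid = (lo+hi)//2; if total_digits(mid) < num: lo = mid else: hi = mid
def get_nth_digit_bisect (num : Int) (fuel : Nat) (lo hi : Int) : Int × Int :=
  match fuel with
  | 0 => (lo, hi)
  | fuel + 1 =>
    if hi - lo > 1 then
      let mid := PySem.Int.floordiv (lo + hi) 2
      if get_nth_digit_totalDigits mid < num then get_nth_digit_bisect num fuel mid hi
      else get_nth_digit_bisect num fuel lo mid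
    else (lo, hi)

def get_nth_digit_alt (num : Int) : Int :=
  if num ≤ 5 then (num - 1) * 2
  else
    let hi := get_nth_digit_grow num num.toNat 1
    let lo := (get_nth_digit_bisect num hi.toNat 0 hi).1
    let e := 2 * lo
    let d := get_nth_digit_numDigits e
    let offset := num - 1 - get_nth_digit_totalDigits lo
    PySem.Int.mod (PySem.Int.floordiv e (10 ^ (d - 1 - offset).toNat)) 10

-- ===== PRECONDITION & SPEC =====
def Spec_get_nth_digit (num : Int) (out : Int) : Prop := out = get_nth_digit_alt num
instance (num : Int) (out : Int) : Decidable (Spec_get_nth_digit num out) := by unfold Spec_get_nth_digit; infer_instance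

-- ===== CLAIM (what is proved, stated in full; the proofs are below) =====
def Claim_equal_get_nth_digit : Prop := ∀ (num : Int), Dom_get_nth_digit num → Spec_get_nth_digit num (get_nth_digit num)

-- ===== LEMMAS AND PROOFS =====

-- pvT d = 0 + 5 + 50 + ... : the subtractive term 5*(10^(d-1)-1)/9 of the closed-form digit count
def pvT : Nat → Int
  | 0 => 0
  | 1 => 0
  | d + 2 => pvT (d + 1) + 5 * 10 ^ d

-- pvS k = total number of digits contributed by all even numbers of at most k digits
def pvS : Nat → Int
  | 0 => 5
  | 1 => 5
  | k + 2 => pvS (k + 1) + 45 * (k + 2) * 10 ^ k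

theorem pv_ten_pow_pos (n : Nat) : (0:Int) < 10 ^ n := pow_pos (by norm_num) n

theorem pv_ten_pow_mono {n m : Nat} (h : n ≤ m) : (10:Int) ^ n ≤ 10 ^ m :=
  pow_le_pow_right₀ (by norm_num) h

theorem pv_ten_pow_big (m : Nat) : (m:Int) + 1 ≤ 10 ^ m := by
  induction m with
  | zero => norm_num
  | succ m ih =>
    have := pv_ten_pow_pos m
    rw [pow_succ]
    push_cast
    nlinarith

theorem pv_pow_pred (d : Nat) (hd : 1 ≤ d) : (10:Int) ^ d = 10 * 10 ^ (d - 1) := by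
  conv_lhs => rw [show d = (d - 1) + 1 by omega]
  rw [pow_succ]; ring

theorem pvT_succ (d : Nat) (hd : 1 ≤ d) : pvT (d + 1) = pvT d + 5 * 10 ^ (d - 1) := by
  conv_lhs => rw [show d + 1 = (d - 1) + 2 by omega]
  rw [pvT, show d - 1 + 1 = d by omega]

theorem pvS_succ (k : Nat) (hk : 1 ≤ k) :
    pvS (k + 1) = pvS k + 45 * ((k:Int) + 1) * 10 ^ (k - 1) := by
  conv_lhs => rw [show k + 1 = (k - 1) + 2 by omega]
  rw [pvS, show k - 1 + 1 = k by omega]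
  have hc : ((k - 1 : Nat) : Int) = (k : Int) - 1 := by omega
  rw [hc]
  ring

theorem pvT_nine (d : Nat) (hd : 1 ≤ d) : 9 * pvT d = 5 * (10 ^ (d - 1) - 1) := by
  induction d with
  | zero => omega
  | succ d ih =>
    rcases Nat.eq_or_lt_of_le hd with h | h
    · simp [← h, pvT]
    · have hd1 : 1 ≤ d := by omega
      rw [pvT_succ d hd1, Nat.add_sub_cancel, pv_pow_pred d hd1]
      have := ih hd1
      linarith

theorem pvS_closed (k : Nat) (hk : 1 ≤ k) : pvS k = 5 * k * 10 ^ (k - 1) - pvT k := by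
  induction k with
  | zero => omega
  | succ k ih =>
    rcases Nat.eq_or_lt_of_le hk with h | h
    · simp [← h, pvS, pvT]
    · have hk1 : 1 ≤ k := by omega
      rw [pvS_succ k hk1, pvT_succ k hk1, Nat.add_sub_cancel, pv_pow_pred k hk1, ih hk1]
      push_cast
      ring

-- floordiv by 9 of 5*(10^(d-1)-1) is exactly pvT d
theorem pvT_floordiv (d : Nat) (hd : 1 ≤ d) :
    PySem.Int.floordiv (5 * ((10:Int) ^ (d - 1) - 1)) 9 = pvT d := by
  have h : (5:Int) * (10 ^ (d - 1) - 1) = 9 * pvT d := (pvT_nine d hd).symm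
  rw [h, PySem.Int.floordiv_eq_ediv_of_pos (by norm_num : (0:Int) < 9)]
  exact Int.mul_ediv_cancel_left _ (by norm_num)

-- the digit-count loop computes the unique e with 10^(e-1) ≤ x < 10^e
theorem pv_ndLoop_eq (x : Int) (e : Nat) (h1 : (10:Int) ^ (e - 1) ≤ x) (h2 : x < 10 ^ e) :
    ∀ (fuel : Nat) (d : Nat), 1 ≤ d → d ≤ e → e - d ≤ fuel →
      get_nth_digit_ndLoop x fuel (d : Int) = (e : Int) := by
  intro fuel
  induction fuel with
  | zero =>
    intro d hd hde hf
    have : d = e := by omega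
    simp [get_nth_digit_ndLoop, this]
  | succ fuel ih =>
    intro d hd hde hf
    have hdt : ((d : Int)).toNat = d := by omega
    by_cases hc : (10:Int) ^ d ≤ x
    · have hdlt : d < e := by
        rcases Nat.eq_or_lt_of_le hde with h | h
        · exfalso; rw [h] at hc; omega
        · exact h
      have step : get_nth_digit_ndLoop x (fuel + 1) (d : Int) =
          get_nth_digit_ndLoop x fuel ((d : Int) + 1) := by
        simp only [get_nth_digit_ndLoop, hdt, if_pos hc]
      rw [step, show ((d:Int) + 1) = ((d + 1 : Nat) : Int) by push_cast; ring]
      exact ih (d + 1) (by omega) (by omega) (by omega)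
    · have hde' : d = e := by
        by_contra hne
        exact hc (le_trans (pv_ten_pow_mono (by omega : d ≤ e - 1)) h1)
      subst hde'
      simp only [get_nth_digit_ndLoop, hdt, if_neg hc]

theorem pv_numDigits_eq (x : Int) (e : Nat) (he : 1 ≤ e)
    (h1 : (10:Int) ^ (e - 1) ≤ x) (h2 : x < 10 ^ e) :
    get_nth_digit_numDigits x = (e : Int) := by
  unfold get_nth_digit_numDigits
  have hx1 : (1:Int) ≤ x := le_trans (by have := pv_ten_pow_pos (e-1); omega) h1
  have hbig : (e:Int) ≤ 10 ^ (e - 1) := by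
    have := pv_ten_pow_big (e - 1)
    omega
  have hfuel : e - 1 ≤ x.toNat + 1 := by omega
  have := pv_ndLoop_eq x e h1 h2 (x.toNat + 1) 1 le_rfl he hfuel
  simpa using this

theorem pv_numDigits_small (x : Int) (h0 : 0 ≤ x) (h10 : x < 10) :
    get_nth_digit_numDigits x = 1 := by
  rcases eq_or_lt_of_le h0 with h | h
  · rw [← h]; decide
  · exact pv_numDigits_eq x 1 le_rfl (by simpa using h) (by simpa using h10)

-- closed form of total_digits on the d-digit bracket
theorem pv_totalDigits_formula (i : Int) (d : Nat) (hd : 1 ≤ d)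
    (hlow : (10:Int) ^ (d - 1) ≤ 2 * i - 2 ∨ (d = 1 ∧ 0 ≤ 2 * i - 2))
    (hhigh : 2 * i - 2 < 10 ^ d) :
    get_nth_digit_totalDigits i = d * i - pvT d := by
  have hnd : get_nth_digit_numDigits (2 * i - 2) = (d : Int) := by
    rcases hlow with h | ⟨h1, h2⟩
    · exact pv_numDigits_eq _ d hd h hhigh
    · subst h1
      exact_mod_cast pv_numDigits_small _ h2 (by simpa using hhigh)
  simp only [get_nth_digit_totalDigits, hnd]
  rw [show (((d:Int)) - 1).toNat = d - 1 by omega, pvT_floordiv d hd]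

-- every nonnegative y has a digit count: the bracket condition is satisfiable
theorem pv_digits_exist (y : Int) (hy : 0 ≤ y) :
    ∃ d : Nat, 1 ≤ d ∧ ((10:Int) ^ (d - 1) ≤ y ∨ (d = 1 ∧ 0 ≤ y)) ∧ y < 10 ^ d := by
  rcases lt_or_ge y 10 with h | h
  · exact ⟨1, le_rfl, Or.inr ⟨rfl, hy⟩, by simpa using h⟩
  · have hy1 : 1 ≤ y.toNat := by omega
    refine ⟨Nat.log 10 y.toNat + 1, by omega, Or.inl ?_, ?_⟩
    · have hlog := Nat.pow_log_le_self 10 (by omega : y.toNat ≠ 0)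
      have h' : ((10 ^ Nat.log 10 y.toNat : Nat) : Int) ≤ y := by
        have : ((10 ^ Nat.log 10 y.toNat : Nat) : Int) ≤ (y.toNat : Int) := by exact_mod_cast hlog
        omega
      simpa using h'
    · have hlt := Nat.lt_pow_succ_log_self (by norm_num : 1 < 10) y.toNat
      have h' : y < ((10 ^ (Nat.log 10 y.toNat + 1) : Nat) : Int) := by
        have : (y.toNat : Int) < ((10 ^ (Nat.log 10 y.toNat + 1) : Nat) : Int) := by exact_mod_cast hlt
        omega
      simpa using h'

-- strict growth: each further even number contributes at least one digit
theorem pv_totalDigits_strict (i : Int) (hi : 1 ≤ i) :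
    get_nth_digit_totalDigits i + 1 ≤ get_nth_digit_totalDigits (i + 1) := by
  obtain ⟨d, hd1, hlow, hhigh⟩ := pv_digits_exist (2 * i - 2) (by omega)
  have hCi : get_nth_digit_totalDigits i = d * i - pvT d :=
    pv_totalDigits_formula i d hd1 hlow hhigh
  by_cases hc : 2 * i < 10 ^ d
  · have hCi1 : get_nth_digit_totalDigits (i + 1) = d * (i + 1) - pvT d := by
      apply pv_totalDigits_formula (i + 1) d hd1
      · rcases hlow with h | ⟨h1, h2⟩
        · left; omega
        · right; exact ⟨h1, by omega⟩
      · omega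
    rw [hCi, hCi1]
    have : (1:Int) ≤ (d:Int) := by exact_mod_cast hd1
    nlinarith
  · have hc' : (10:Int) ^ d ≤ 2 * i := by omega
    have hpow := pv_pow_pred d hd1
    have heven : 2 * i = 10 ^ d := by
      have h5 := pv_ten_pow_pos (d - 1)
      omega
    have hCi1 : get_nth_digit_totalDigits (i + 1) = (d + 1 : Nat) * (i + 1) - pvT (d + 1) := by
      apply pv_totalDigits_formula (i + 1) (d + 1) (by omega)
      · left
        simp only [Nat.add_sub_cancel]
        omega
      · have hp : (10:Int) ^ (d + 1) = 10 * 10 ^ d := by rw [pow_succ]; ring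
        have h5 := pv_ten_pow_pos d
        omega
    rw [hCi, hCi1, pvT_succ d hd1]
    have hi5 : i = 5 * 10 ^ (d - 1) := by omega
    push_cast
    nlinarith [pv_ten_pow_pos (d - 1)]

theorem pv_totalDigits_mono (i j : Int) (hi : 1 ≤ i) (hij : i ≤ j) :
    get_nth_digit_totalDigits i ≤ get_nth_digit_totalDigits j := by
  have key : ∀ n : Nat, get_nth_digit_totalDigits i ≤ get_nth_digit_totalDigits (i + n) := by
    intro n
    induction n with
    | zero => simp
    | succ n ih =>
      have hstep := pv_totalDigits_strict (i + n) (by omega)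
      have harr : i + ((n : Int) + 1) = (i + n) + 1 := by ring
      push_cast
      rw [harr]
      omega
  have hj : j = i + (((j - i).toNat : Nat) : Int) := by omega
  rw [hj]
  exact key _

-- total_digits i ≥ i: each of the first i even numbers has at least one digit
theorem pv_totalDigits_ge (i : Int) (hi : 1 ≤ i) : i ≤ get_nth_digit_totalDigits i := by
  obtain ⟨d, hd1, hlow, hhigh⟩ := pv_digits_exist (2 * i - 2) (by omega)
  rw [pv_totalDigits_formula i d hd1 hlow hhigh]
  rcases Nat.eq_or_lt_of_le hd1 with h | h
  · simp [← h, pvT]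
  · have hd2 : 2 ≤ d := h
    have hlow' : (10:Int) ^ (d - 1) ≤ 2 * i - 2 := by
      rcases hlow with h' | ⟨h1, _⟩
      · exact h'
      · omega
    have hpow : (10:Int) ^ (d - 1) = 10 * 10 ^ (d - 2) := by
      rw [show d - 1 = (d - 2) + 1 by omega, pow_succ]; ring
    have hibound : 5 * 10 ^ (d - 2) + 1 ≤ i := by omega
    have h9T : 9 * pvT d = 5 * (10 ^ (d - 1) - 1) := pvT_nine d hd1
    have hp := pv_ten_pow_pos (d - 2)
    rcases Nat.lt_or_ge d 3 with h3 | h3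
    · have hd2' : d = 2 := by omega
      subst hd2'
      have hT2 : pvT 2 = 5 := rfl
      have hp1 : (10:Int) ^ (2 - 2) = 1 := by norm_num
      rw [hp1] at hibound
      rw [hT2]
      push_cast
      omega
    · have hd3 : (3:Int) ≤ (d:Int) := by exact_mod_cast h3
      nlinarith [mul_nonneg (by omega : (0:Int) ≤ (d:Int) - 3) (by omega : (0:Int) ≤ i)]

-- the doubling loop reaches a count whose digits cover position num
theorem pv_grow_spec (num : Int) :
    ∀ (fuel : Nat) (hi : Int), 1 ≤ hi → num - hi ≤ fuel →
      1 ≤ get_nth_digit_grow num fuel hi ∧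
      num ≤ get_nth_digit_totalDigits (get_nth_digit_grow num fuel hi) := by
  intro fuel
  induction fuel with
  | zero =>
    intro hi h1 hf
    refine ⟨h1, ?_⟩
    simp only [get_nth_digit_grow]
    exact le_trans (by omega) (pv_totalDigits_ge hi h1)
  | succ fuel ih =>
    intro hi h1 hf
    by_cases hc : get_nth_digit_totalDigits hi < num
    · simp only [get_nth_digit_grow, if_pos hc]
      exact ih (hi * 2) (by omega) (by omega)
    · simp only [get_nth_digit_grow, if_neg hc]
      exact ⟨h1, by omega⟩

-- bisection invariant: final (lo, hi) has hi = lo + 1, C lo < num ≤ C hi (lo = 0 allowed)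
theorem pv_bisect_spec (num : Int) :
    ∀ (fuel : Nat) (lo hi : Int), 0 ≤ lo → lo < hi →
      (lo = 0 ∨ (1 ≤ lo ∧ get_nth_digit_totalDigits lo < num)) →
      num ≤ get_nth_digit_totalDigits hi →
      (hi - lo).toNat ≤ fuel + 1 →
      (get_nth_digit_bisect num fuel lo hi).2 = (get_nth_digit_bisect num fuel lo hi).1 + 1 ∧
      0 ≤ (get_nth_digit_bisect num fuel lo hi).1 ∧
      ((get_nth_digit_bisect num fuel lo hi).1 = 0 ∨
        (1 ≤ (get_nth_digit_bisect num fuel lo hi).1 ∧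
         get_nth_digit_totalDigits (get_nth_digit_bisect num fuel lo hi).1 < num)) ∧
      num ≤ get_nth_digit_totalDigits (get_nth_digit_bisect num fuel lo hi).2 := by
  intro fuel
  induction fuel with
  | zero =>
    intro lo hi h0 hlt hinv hhi hf
    have : hi = lo + 1 := by omega
    simp only [get_nth_digit_bisect]
    exact ⟨by omega, h0, hinv, by rw [this] at hhi ⊢; exact hhi⟩
  | succ fuel ih =>
    intro lo hi h0 hlt hinv hhi hf
    by_cases hgap : hi - lo > 1
    · have hmid : PySem.Int.floordiv (lo + hi) 2 = (lo + hi) / 2 :=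
        PySem.Int.floordiv_eq_ediv_of_pos (by norm_num)
      have hdm := Int.mul_ediv_add_emod (lo + hi) 2
      have hm0 : 0 ≤ (lo + hi) % 2 := Int.emod_nonneg _ (by norm_num)
      have hm2 : (lo + hi) % 2 < 2 := Int.emod_lt_of_pos _ (by norm_num)
      set mid := (lo + hi) / 2 with hmiddef
      have hmlo : lo < mid := by omega
      have hmhi : mid < hi := by omega
      by_cases hc : get_nth_digit_totalDigits mid < num
      · have step : get_nth_digit_bisect num (fuel + 1) lo hi =
            get_nth_digit_bisect num fuel mid hi := by
          simp only [get_nth_digit_bisect, if_pos hgap, hmid, if_pos hc]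
        rw [step]
        exact ih mid hi (by omega) hmhi (Or.inr ⟨by omega, hc⟩) hhi (by omega)
      · have step : get_nth_digit_bisect num (fuel + 1) lo hi =
            get_nth_digit_bisect num fuel lo mid := by
          simp only [get_nth_digit_bisect, if_pos hgap, hmid, if_neg hc]
        rw [step]
        exact ih lo mid h0 hmlo hinv (by omega) (by omega)
    · have : hi = lo + 1 := by omega
      simp only [get_nth_digit_bisect, if_neg hgap]
      exact ⟨by omega, h0, hinv, by rw [this] at hhi ⊢; exact hhi⟩

-- A's loop lands in the k-digit block: S(k-1) < num ≤ S(k), leftover ost = num - S(k-1)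
theorem pv_loopA_spec (num : Int) :
    ∀ (fuel : Nat) (kn : Nat) (m ost : Int), 2 ≤ kn → m = pvS kn →
      pvS (kn - 1) < num → ost = num - pvS (kn - 1) → num - m ≤ fuel →
      ∃ rn : Nat, 2 ≤ rn ∧
        get_nth_digit_loopA num fuel (kn : Int) m ost = ((rn : Int), num - pvS (rn - 1)) ∧
        pvS (rn - 1) < num ∧ num ≤ pvS rn := by
  intro fuel
  induction fuel with
  | zero =>
    intro kn m ost hk hm hlt host hf
    exact ⟨kn, hk, by simp [get_nth_digit_loopA, host], hlt, by omega⟩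
  | succ fuel ih =>
    intro kn m ost hk hm hlt host hf
    by_cases hc : num > m
    · have hSsucc := pvS_succ kn (by omega)
      have hexp : ((kn : Int) + 1 - 2).toNat = kn - 1 := by omega
      have step : get_nth_digit_loopA num (fuel + 1) (kn : Int) m ost =
          get_nth_digit_loopA num fuel ((kn : Int) + 1)
            (m + 45 * ((kn : Int) + 1) * 10 ^ (kn - 1)) (num - m) := by
        simp only [get_nth_digit_loopA, if_pos hc, hexp]
      rw [step]
      have harg : ((kn : Int) + 1) = ((kn + 1 : Nat) : Int) := by push_cast; ring
      rw [harg]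
      have hpos : (0:Int) < 45 * ((kn : Int) + 1) * 10 ^ (kn - 1) := by positivity
      have hone := Int.add_one_le_iff.mpr hpos
      have := ih (kn + 1) (m + 45 * ((kn : Int) + 1) * 10 ^ (kn - 1)) (num - m)
        (by omega)
        (by rw [hSsucc, hm])
        (by simp only [Nat.add_sub_cancel]; omega)
        (by simp only [Nat.add_sub_cancel]; omega)
        (by push_cast at hf ⊢; linarith)
      exact this
    · exact ⟨kn, hk, by simp [get_nth_digit_loopA, hc, host], hlt, by omega⟩

-- A's closed-form extraction equals direct digit addressing via divmod(ost-1, k)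
theorem pv_final_agree (k ost : Int) (hk : 2 ≤ k) :
    (if PySem.Int.mod ost k = 0 then
        PySem.Int.mod (10 ^ (k - 1).toNat - 2 + 2 * PySem.Int.floordiv (ost + k - 1) k) 10
     else
        PySem.Int.mod (PySem.Int.floordiv
          (10 ^ (k - 1).toNat - 2 + 2 * PySem.Int.floordiv (ost + k - 1) k)
          (10 ^ (k - PySem.Int.mod ost k).toNat)) 10)
    = PySem.Int.mod (PySem.Int.floordiv
        (10 ^ (k - 1).toNat + 2 * PySem.Int.floordiv (ost - 1) k)
        (10 ^ (k - 1 - PySem.Int.mod (ost - 1) k).toNat)) 10 := by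
  have hkpos : (0 : Int) < k := by omega
  set q := PySem.Int.floordiv (ost - 1) k with hq
  set r := PySem.Int.mod (ost - 1) k with hr
  have hqe : q = (ost - 1) / k := by rw [hq, PySem.Int.floordiv_eq_ediv_of_pos hkpos]
  have hre : r = (ost - 1) % k := by rw [hr, PySem.Int.mod_eq_emod_of_pos hkpos]
  have hrlo : 0 ≤ r := by rw [hre]; exact Int.emod_nonneg _ (by omega)
  have hrhi : r < k := by rw [hre]; exact Int.emod_lt_of_pos _ hkpos
  have hqk : q * k + r = ost - 1 := by
    rw [hqe, hre]; rw [Int.mul_comm]; exact Int.mul_ediv_add_emod (ost - 1) k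
  have hceil : PySem.Int.floordiv (ost + k - 1) k = q + 1 := by
    rw [PySem.Int.floordiv_eq_ediv_of_pos hkpos, hqe]
    have : ost + k - 1 = (ost - 1) + 1 * k := by ring
    rw [this, Int.add_mul_ediv_right _ _ (by omega : k ≠ 0)]
  have hn : (10 : Int) ^ (k - 1).toNat - 2 + 2 * PySem.Int.floordiv (ost + k - 1) k
      = 10 ^ (k - 1).toNat + 2 * q := by rw [hceil]; ring
  have hmod : PySem.Int.mod ost k = (r + 1) % k := by
    rw [PySem.Int.mod_eq_emod_of_pos hkpos]
    have : ost = r + 1 + q * k := by omega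
    rw [this]; rw [Int.mul_comm q k, Int.add_mul_emod_self_left]
  by_cases hcase : r = k - 1
  · have hz : PySem.Int.mod ost k = 0 := by
      rw [hmod, hcase]; simp
    rw [if_pos hz, hn, hcase]
    have hexp : k - 1 - (k - 1) = 0 := by omega
    rw [hexp]
    have : (10 : Int) ^ ((0:Int)).toNat = 1 := by norm_num
    rw [this]
    rw [PySem.Int.floordiv_eq_ediv_of_pos (by norm_num : (0:Int) < 1), Int.ediv_one]
  · have hval : PySem.Int.mod ost k = r + 1 := by
      rw [hmod]; exact Int.emod_eq_of_lt (by omega) (by omega)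
    have hnz : ¬ PySem.Int.mod ost k = 0 := by omega
    rw [if_neg hnz, hn, hval]
    have hexp : k - (r + 1) = k - 1 - r := by omega
    rw [hexp]

-- the count of evens whose digits precede the block-(k) element addressed by A:
-- with k = j+2 and q = (ost-1)//k, the owning even number is 10^(j+1) + 2q,
-- i.e. the (5*10^j + q)-th even (0-based)
theorem pv_C_loA (j : Nat) (q : Int) (hq0 : 0 ≤ q) (hqhi : q ≤ 45 * 10 ^ j - 1) :
    get_nth_digit_totalDigits (5 * 10 ^ j + q) = pvS (j + 1) + (j + 2) * q ∧
    get_nth_digit_totalDigits (5 * 10 ^ j + q + 1) = pvS (j + 1) + (j + 2) * q + (j + 2) := by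
  have hp := pv_ten_pow_pos j
  have hpow1 : (10:Int) ^ (j + 1) = 10 * 10 ^ j := by rw [pow_succ]; ring
  have hpow2 : (10:Int) ^ (j + 2) = 100 * 10 ^ j := by
    rw [pow_succ, pow_succ]; ring
  have hT2 : pvT (j + 2) = pvT (j + 1) + 5 * 10 ^ j := rfl
  have hScl : pvS (j + 1) = 5 * ((j:Int) + 1) * 10 ^ j - pvT (j + 1) := by
    have := pvS_closed (j + 1) (by omega)
    simpa using this
  constructor
  · by_cases hq1 : 1 ≤ q
    · have hform : get_nth_digit_totalDigits (5 * 10 ^ j + q)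
          = ((j + 2 : Nat) : Int) * (5 * 10 ^ j + q) - pvT (j + 2) := by
        apply pv_totalDigits_formula _ (j + 2) (by omega)
        · left
          rw [show j + 2 - 1 = j + 1 by omega]
          omega
        · omega
      rw [hform, hT2, hScl]
      push_cast
      ring
    · have hq : q = 0 := by omega
      subst hq
      have hform : get_nth_digit_totalDigits (5 * 10 ^ j + 0)
          = ((j + 1 : Nat) : Int) * (5 * 10 ^ j + 0) - pvT (j + 1) := by
        apply pv_totalDigits_formula _ (j + 1) (by omega)
        · left
          rw [Nat.add_sub_cancel]
          omega
        · omega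
      rw [hform, hScl]
      push_cast
      ring
  · have hform : get_nth_digit_totalDigits (5 * 10 ^ j + q + 1)
        = ((j + 2 : Nat) : Int) * (5 * 10 ^ j + q + 1) - pvT (j + 2) := by
      apply pv_totalDigits_formula _ (j + 2) (by omega)
      · left
        rw [show j + 2 - 1 = j + 1 by omega]
        omega
      · omega
    rw [hform, hT2, hScl]
    push_cast
    ring

-- C 1 = 1 (needed to rule out lo = 0 after bisection, since num > 5)
theorem pv_totalDigits_one : get_nth_digit_totalDigits 1 = 1 := by decide

-- the central equality
theorem get_nth_digit_eq (num : Int) : get_nth_digit num = get_nth_digit_alt num := by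
  by_cases h5 : num ≤ 5
  · simp [get_nth_digit, get_nth_digit_alt, h5]
  · have hnum : 6 ≤ num := by omega
    have hS1 : pvS 1 = 5 := rfl
    have hS2 : pvS 2 = 95 := by decide
    -- ===== A side: characterize the loop =====
    obtain ⟨rn, hrn2, hloopA, hSlt, hSge⟩ :=
      pv_loopA_spec num num.toNat 2 95 (num - 5) (le_refl 2)
        hS2.symm (by simpa [hS1] using hnum) (by simp [hS1]) (by omega)
    obtain ⟨j, rfl⟩ : ∃ j, rn = j + 2 := ⟨rn - 2, by omega⟩
    have hj1 : j + 2 - 1 = j + 1 := by omega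
    rw [hj1] at hloopA hSlt
    set ost := num - pvS (j + 1) with host
    have hloopA2 : get_nth_digit_loopA num num.toNat 2 95 (num - 5)
        = (((j:Int) + 2), ost) := by
      simp only [Nat.cast_ofNat] at hloopA
      rw [hloopA, show ((j + 2 : Nat) : Int) = (j : Int) + 2 by push_cast; ring]
    have hA : get_nth_digit num =
        (if PySem.Int.mod ost ((j:Int) + 2) = 0 then
          PySem.Int.mod (10 ^ (((j:Int) + 2) - 1).toNat - 2 +
            2 * PySem.Int.floordiv (ost + ((j:Int) + 2) - 1) ((j:Int) + 2)) 10
        else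
          PySem.Int.mod (PySem.Int.floordiv
            (10 ^ (((j:Int) + 2) - 1).toNat - 2 +
              2 * PySem.Int.floordiv (ost + ((j:Int) + 2) - 1) ((j:Int) + 2))
            (10 ^ (((j:Int) + 2) - PySem.Int.mod ost ((j:Int) + 2)).toNat)) 10) := by
      simp only [get_nth_digit, if_neg h5, hloopA2]
    rw [hA, pv_final_agree ((j:Int) + 2) ost (by omega)]
    -- abbreviations for the quotient/remainder addressing
    set q := PySem.Int.floordiv (ost - 1) ((j:Int) + 2) with hqdef
    set r := PySem.Int.mod (ost - 1) ((j:Int) + 2) with hrdef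
    have hkpos : (0:Int) < (j:Int) + 2 := by positivity
    have hqe : q = (ost - 1) / ((j:Int) + 2) := by
      rw [hqdef, PySem.Int.floordiv_eq_ediv_of_pos hkpos]
    have hre : r = (ost - 1) % ((j:Int) + 2) := by
      rw [hrdef, PySem.Int.mod_eq_emod_of_pos hkpos]
    have host1 : 1 ≤ ost := by omega
    have hblock : pvS (j + 2) = pvS (j + 1) + 45 * ((j:Int) + 2) * 10 ^ j := by
      have h := pvS_succ (j + 1) (by omega)
      simp only [Nat.add_sub_cancel] at h
      rw [show j + 1 + 1 = j + 2 from rfl] at h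
      rw [h]; push_cast; ring
    have hosthi : ost ≤ 45 * ((j:Int) + 2) * 10 ^ j := by
      have : num ≤ pvS (j + 2) := hSge
      omega
    have hrlo : 0 ≤ r := by rw [hre]; exact Int.emod_nonneg _ (by omega)
    have hrhi : r < (j:Int) + 2 := by rw [hre]; exact Int.emod_lt_of_pos _ hkpos
    have hqk : q * ((j:Int) + 2) + r = ost - 1 := by
      rw [hqe, hre, Int.mul_comm]; exact Int.mul_ediv_add_emod (ost - 1) _
    have hp := pv_ten_pow_pos j
    have hq0 : 0 ≤ q := by nlinarith
    have hqhi : q ≤ 45 * 10 ^ j - 1 := by nlinarith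
    obtain ⟨hCla, hCla1⟩ := pv_C_loA j q hq0 hqhi
    have hqcomm : ((j:Int) + 2) * q = q * ((j:Int) + 2) := by ring
    set loA := 5 * 10 ^ j + q with hloAdef
    -- ===== B side: the binary search finds exactly loA =====
    obtain ⟨hhi1, hhiC⟩ := pv_grow_spec num num.toNat 1 le_rfl (by omega)
    set hi := get_nth_digit_grow num num.toNat 1 with hhidef
    obtain ⟨hbsucc, hb0, hbinv, hbhi⟩ :=
      pv_bisect_spec num hi.toNat 0 hi le_rfl (by omega) (Or.inl rfl) hhiC (by omega)
    set L := (get_nth_digit_bisect num hi.toNat 0 hi).1 with hLdef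
    rw [hbsucc] at hbhi
    have hL1 : 1 ≤ L ∧ get_nth_digit_totalDigits L < num := by
      rcases hbinv with h0 | h
      · exfalso
        rw [h0] at hbhi
        rw [show (0:Int) + 1 = 1 from by ring, pv_totalDigits_one] at hbhi
        omega
      · exact h
    have hClalt : get_nth_digit_totalDigits loA < num := by
      rw [hCla]; omega
    have hCla1ge : num ≤ get_nth_digit_totalDigits (loA + 1) := by
      rw [hCla1]; omega
    have hLeq : L = loA := by
      by_contra hne
      rcases lt_or_gt_of_ne hne with hlt | hgt
      · have := pv_totalDigits_mono (L + 1) loA (by omega) (by omega)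
        omega
      · have := pv_totalDigits_mono (loA + 1) L (by omega) (by omega)
        omega
    -- ===== both sides are the same digit of the same even number =====
    have he : 2 * loA = 10 ^ (j + 1) + 2 * q := by
      rw [hloAdef, pow_succ]; ring
    have hd : get_nth_digit_numDigits (2 * loA) = ((j + 2 : Nat) : Int) := by
      apply pv_numDigits_eq _ (j + 2) (by omega)
      · rw [he]
        have : j + 2 - 1 = j + 1 := by omega
        rw [this]
        omega
      · rw [he, pow_succ, pow_succ]
        nlinarith
    have hoffset : num - 1 - get_nth_digit_totalDigits loA = r := by
      rw [hCla]; omega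
    have hB : get_nth_digit_alt num =
        PySem.Int.mod (PySem.Int.floordiv (2 * L)
          (10 ^ (get_nth_digit_numDigits (2 * L) - 1 -
            (num - 1 - get_nth_digit_totalDigits L)).toNat)) 10 := by
      simp only [get_nth_digit_alt, if_neg h5]
      rfl
    rw [hB, hLeq, hd, hoffset, he]
    have hexp1 : (((j:Int) + 2) - 1).toNat = j + 1 := by omega
    have hexp2 : ((j + 2 : Nat) : Int) - 1 - r = ((j:Int) + 2) - 1 - r := by push_cast; ring
    rw [hexp1, hexp2]
-- ===== VERDICT (by name: the statement is the Claim_ definition above) =====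
theorem get_nth_digit_spec : Claim_equal_get_nth_digit := by
  intro num _
  unfold Spec_get_nth_digit
  exact get_nth_digit_eq num
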